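-- pv_equiv track=rewrite | github.com/eliottcassidy2000/math | 04-computation/hook_expansion_test.py | count_perms_with_descent_set
-- ===== SOURCE A (Python) =====
-- from itertools import permutations
--
-- def count_perms_with_descent_set(T, desc_set):
--     """Count permutations sigma in S_n whose T-descent set equals desc_set.
--     A T-descent at position i means T[sigma[i]][sigma[i+1]] = 0 (i.e., sigma[i+1] -> sigma[i])."""
--     n = len(T)
--     count = 0
--     for perm in permutations(range(n)):
--         actual_desc = set()
--         for i in range(n-1):
--             if T[perm[i+1]][perm[i]]:  # sigma[i+1] -> sigma[i] means descent
--                 actual_desc.add(i+1)  # 1-indexed position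
--         if actual_desc == desc_set:
--             count += 1
--     return count
-- ===== SOURCE B (Python) =====
-- def count_perms_with_descent_set(T, desc_set):
--     """Count permutations sigma in S_n whose T-descent set equals desc_set.
--
--     Instead of enumerating all n! permutations and computing each full descent
--     set (as A does), build permutations one element at a time and prune every
--     prefix as soon as the descent indicator at the newly created position
--     disagrees with desc_set; a permutation is counted exactly when every
--     position matched."""
--     n = len(T)
--     if any(p < 1 or p > n - 1 for p in desc_set):
--         return 0
--     def go(remaining, last, k):
--         if not remaining:
--             return 1
--         total = 0
--         for idx in range(len(remaining)):
--             v = remaining[idx]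
--             if k == 0 or ((T[v][last] != 0) == (k in desc_set)):
--                 total += go(remaining[:idx] + remaining[idx + 1:], v, k + 1)
--         return total
--     return go(list(range(n)), 0, 0)
-- ===== Notes on version B (the rewrite author's own statement) =====
-- stated objective: faster
-- what changed: A enumerates all n! permutations and computes each one's full descent set before comparing; B builds permutations one element at a time and prunes a prefix as soon as the descent indicator at the newly created position disagrees with desc_set (after rejecting desc_set elements outside 1..n-1 up front), so only matching prefixes are ever extended.
import Mathlib
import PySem

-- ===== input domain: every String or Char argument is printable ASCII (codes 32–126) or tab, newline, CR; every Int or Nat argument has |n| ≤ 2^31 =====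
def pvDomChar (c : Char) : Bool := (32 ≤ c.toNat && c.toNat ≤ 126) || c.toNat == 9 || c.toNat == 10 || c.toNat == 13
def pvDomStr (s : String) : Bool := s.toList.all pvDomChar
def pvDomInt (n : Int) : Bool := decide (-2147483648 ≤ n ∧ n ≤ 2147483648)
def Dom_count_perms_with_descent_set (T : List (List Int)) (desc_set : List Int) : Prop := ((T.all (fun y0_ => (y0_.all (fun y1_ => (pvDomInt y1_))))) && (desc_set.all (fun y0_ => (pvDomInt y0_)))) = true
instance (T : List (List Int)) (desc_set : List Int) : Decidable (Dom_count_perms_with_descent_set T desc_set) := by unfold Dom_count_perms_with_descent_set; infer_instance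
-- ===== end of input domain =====

-- B replaces A's full enumeration of all n! permutations by a depth-first build
-- of permutation prefixes that prunes a prefix as soon as the descent indicator
-- at the newly created position disagrees with desc_set (objective: faster).

-- ===== PORT A =====
-- A-side helper: the inner Python loop building actual_desc (a Python set) for one perm.
-- Indexing uses pyGetD: Pre_ guarantees every index Python touches is in range
-- (inputs where Python raises IndexError are excluded by Pre_).
def aDescSet (T : List (List Int)) (perm : List Int) (n : Nat) : PySem.Set Int :=
  (PySem.List.pyRange 0 ((n : Int) - 1)).foldl
    (fun s i =>
      if PySem.List.pyGetD (PySem.List.pyGetD T (PySem.List.pyGetD perm (i + 1) 0) [])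
           (PySem.List.pyGetD perm i 0) 0 ≠ 0
      then PySem.Set.add s (i + 1) else s)
    PySem.Set.empty

def count_perms_with_descent_set (T : List (List Int)) (desc_set : List Int) : Int :=
  let n := T.length
  (PySem.List.permutations (PySem.List.pyRange 0 (n : Int)) n).foldl
    (fun count perm =>
      if PySem.Set.equal (aDescSet T perm n) desc_set then count + 1 else count) 0

-- ===== PORT B =====
-- B-side helper: the recursive Python `go(remaining, last, k)`. Python recurses until
-- `remaining` is empty; here a fuel argument (= remaining.length at every call the
-- top level makes) guards termination — a totality guard only, not a different algorithm.
def goAlt (T : List (List Int)) (desc_set : List Int) : Nat → List Int → Int → Int → Int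
  | 0, _, _, _ => 1
  | r + 1, remaining, last, k =>
    (List.range remaining.length).foldl
      (fun total idx =>
        let v := remaining.getD idx 0
        if k = 0 ∨ (decide (PySem.List.pyGetD (PySem.List.pyGetD T v []) last 0 ≠ 0)
                     = decide (k ∈ desc_set))
        then total + goAlt T desc_set r (remaining.eraseIdx idx) v (k + 1)
        else total) 0

def count_perms_with_descent_set_alt (T : List (List Int)) (desc_set : List Int) : Int :=
  let n := T.length
  if desc_set.any (fun p => decide (p < 1) || decide ((n : Int) - 1 < p)) then 0
  else goAlt T desc_set n (PySem.List.pyRange 0 (n : Int)) 0 0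

-- ===== PRECONDITION & SPEC =====
-- Pre_ excludes exactly the inputs on which Python A raises IndexError: A reads
-- T[v][w] for every ordered pair of distinct indices v ≠ w below len(T), so every
-- such access must be in range.
def Pre_count_perms_with_descent_set (T : List (List Int)) (desc_set : List Int) : Prop :=
  ∀ i < T.length, ∀ j < T.length, i ≠ j → j < (T.getD i []).length
instance (T : List (List Int)) (desc_set : List Int) : Decidable (Pre_count_perms_with_descent_set T desc_set) := by unfold Pre_count_perms_with_descent_set; infer_instance
def pvWitness_count_perms_with_descent_set : List (List Int) × List Int := ([[0, 1], [1, 0]], [1])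

def Spec_count_perms_with_descent_set (T : List (List Int)) (desc_set : List Int) (out : Int) : Prop := out = count_perms_with_descent_set_alt T desc_set
instance (T : List (List Int)) (desc_set : List Int) (out : Int) : Decidable (Spec_count_perms_with_descent_set T desc_set out) := by unfold Spec_count_perms_with_descent_set; infer_instance

-- ===== CLAIM (what is proved, stated in full; the proofs are below) =====
def Claim_equal_count_perms_with_descent_set : Prop := ∀ (T : List (List Int)) (desc_set : List Int), Dom_count_perms_with_descent_set T desc_set → Pre_count_perms_with_descent_set T desc_set → Spec_count_perms_with_descent_set T desc_set (count_perms_with_descent_set T desc_set)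

-- ===== LEMMAS AND PROOFS =====

-- Proof-side characterisation of B's pruning: a permutation suffix `rest` placed after
-- `last` starting at position `k` matches desc_set position by position.
def matchFrom (T : List (List Int)) (desc_set : List Int) : List Int → Int → Int → Bool
  | [], _, _ => true
  | v :: rest, last, k =>
      ((k == 0) || (decide (PySem.List.pyGetD (PySem.List.pyGetD T v []) last 0 ≠ 0)
                     == decide (k ∈ desc_set)))
        && matchFrom T desc_set rest v (k + 1)

lemma foldl_if_add {α : Type} (l : List α) (p : α → Prop) [DecidablePred p] (f : α → Int) (a : Int) :
    l.foldl (fun t x => if p x then t + f x else t) a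
      = a + (l.map (fun x => if p x then f x else 0)).sum := by
  induction l generalizing a with
  | nil => simp
  | cons x xs ih =>
    simp only [List.foldl_cons, List.map_cons, List.sum_cons, ih]
    by_cases h : p x <;> simp [h] <;> ring

lemma goAlt_eq_countP (T : List (List Int)) (D : List Int) (r : Nat) :
    ∀ (remaining : List Int) (last k : Int),
      goAlt T D r remaining last k
        = ((PySem.List.permutations remaining r).countP
            (fun rest => matchFrom T D rest last k) : Int) := by
  induction r with
  | zero =>
    intro remaining last k
    simp [goAlt, PySem.List.permutations, matchFrom]
  | succ r ih =>
    intro remaining last k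
    rw [PySem.List.permutations]
    rw [List.countP_flatMap]
    show (List.range remaining.length).foldl
      (fun total idx =>
        if k = 0 ∨ (decide (PySem.List.pyGetD (PySem.List.pyGetD T (remaining.getD idx 0) []) last 0 ≠ 0)
                     = decide (k ∈ D))
        then total + goAlt T D r (remaining.eraseIdx idx) (remaining.getD idx 0) (k + 1)
        else total) 0 = _
    rw [foldl_if_add (p := fun idx => (k = 0 ∨ (decide (PySem.List.pyGetD (PySem.List.pyGetD T (remaining.getD idx 0) []) last 0 ≠ 0) = decide (k ∈ D))))
        (f := fun idx => goAlt T D r (remaining.eraseIdx idx) (remaining.getD idx 0) (k + 1))]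
    rw [Nat.cast_list_sum, List.map_map]
    rw [zero_add]
    apply congrArg
    apply List.map_congr_left
    intro idx hidx
    have hlt : idx < remaining.length := List.mem_range.mp hidx
    have hget : remaining[idx]? = some remaining[idx] := List.getElem?_eq_getElem hlt
    have hgd : remaining.getD idx 0 = remaining[idx] := List.getD_eq_getElem _ _ hlt
    simp only [Function.comp, hget, List.countP_map]
    by_cases hc : k = 0 ∨ (decide (PySem.List.pyGetD (PySem.List.pyGetD T (remaining.getD idx 0) []) last 0 ≠ 0) = decide (k ∈ D))
    · rw [if_pos hc]
      rw [ih]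
      congr 1
      apply List.countP_congr
      intro rest _
      rw [hgd]
      show matchFrom T D rest remaining[idx] (k+1) = true ↔ matchFrom T D (remaining[idx] :: rest) last k = true
      rw [matchFrom]
      constructor
      · intro h; rw [h]
        rw [hgd] at hc
        rcases hc with h0 | he
        · simp [h0]
        · simp [he]
      · intro h
        exact (Bool.and_eq_true _ _ |>.mp h).2
    · rw [if_neg hc]
      symm
      rw [Nat.cast_eq_zero, List.countP_eq_zero]
      intro rest _
      rw [hgd] at hc
      show ¬ (((fun rest => matchFrom T D rest last k) ∘ fun p => remaining[idx] :: p) rest = true)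
      simp only [Function.comp_apply]
      rw [matchFrom]
      intro h
      have := (Bool.and_eq_true _ _ |>.mp h).1
      apply hc
      rcases Bool.or_eq_true _ _ |>.mp this with h0 | he
      · left; exact_mod_cast beq_iff_eq.mp h0
      · right; exact beq_iff_eq.mp he

lemma mem_foldl_ite_add (l : List Int) (p : Int → Prop) [DecidablePred p] (f : Int → Int)
    (s : PySem.Set Int) (y : Int) :
    y ∈ l.foldl (fun s i => if p i then PySem.Set.add s (f i) else s) s
      ↔ y ∈ s ∨ ∃ i ∈ l, p i ∧ y = f i := by
  induction l generalizing s with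
  | nil => simp
  | cons x xs ih =>
    by_cases h : p x <;> simp [h, ih, PySem.Set.mem_add] <;> tauto

lemma mem_aDescSet (T : List (List Int)) (perm : List Int) (n : Nat) (y : Int) :
    y ∈ aDescSet T perm n
      ↔ ∃ j : Nat, j + 1 < n ∧
          PySem.List.pyGetD (PySem.List.pyGetD T (perm.getD (j + 1) 0) [])
            (perm.getD j 0) 0 ≠ 0 ∧ y = (j : Int) + 1 := by
  rw [aDescSet]
  rw [mem_foldl_ite_add (p := fun i => PySem.List.pyGetD (PySem.List.pyGetD T (PySem.List.pyGetD perm (i + 1) 0) []) (PySem.List.pyGetD perm i 0) 0 ≠ 0) (f := fun i => i + 1)]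
  constructor
  · rintro (h | ⟨i, hi, hp, hy⟩)
    · simp [PySem.Set.empty] at h
    · have hr := PySem.List.mem_pyRange_one.mp hi
      refine ⟨i.toNat, by omega, ?_, by omega⟩
      have h1 : i = ((i.toNat : Nat) : Int) := by omega
      rw [h1] at hp
      have h2 : ((i.toNat : Nat) : Int) + 1 = (((i.toNat + 1 : Nat)) : Int) := by push_cast; ring
      rw [h2] at hp
      rw [PySem.List.pyGetD_natCast, PySem.List.pyGetD_natCast] at hp
      simpa using hp
  · rintro ⟨j, hj, hp, hy⟩
    right
    refine ⟨(j : Int), PySem.List.mem_pyRange_one.mpr (by constructor <;> omega), ?_, by omega⟩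
    have h2 : ((j : Nat) : Int) + 1 = (((j + 1 : Nat)) : Int) := by push_cast; ring
    rw [h2, PySem.List.pyGetD_natCast, PySem.List.pyGetD_natCast]
    simpa using hp

lemma matchFrom_iff (T : List (List Int)) (D : List Int) :
    ∀ (rest : List Int) (last k : Int),
      matchFrom T D rest last k = true
        ↔ ∀ j : Nat, j < rest.length → k + (j : Int) ≠ 0 →
            ((PySem.List.pyGetD (PySem.List.pyGetD T (rest.getD j 0) [])
                ((last :: rest).getD j 0) 0 ≠ 0)
              ↔ (k + (j : Int)) ∈ D) := by
  intro rest
  induction rest with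
  | nil => intro last k; simp [matchFrom]
  | cons v rest ih =>
    intro last k
    rw [matchFrom, Bool.and_eq_true, ih v (k + 1)]
    constructor
    · rintro ⟨h1, h2⟩ j hj hk0
      cases j with
      | zero =>
        simp only [List.getD_cons_zero, Nat.cast_zero, add_zero] at *
        rcases Bool.or_eq_true _ _ |>.mp h1 with h0 | he
        · exact absurd (beq_iff_eq.mp h0) hk0
        · have := beq_iff_eq.mp he
          constructor
          · intro hd; exact of_decide_eq_true (this ▸ decide_eq_true hd)
          · intro hm
            have : decide (PySem.List.pyGetD (PySem.List.pyGetD T v []) last 0 ≠ 0) = true := this.symm ▸ decide_eq_true hm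
            exact of_decide_eq_true this
      | succ j =>
        have := h2 j (by simpa using hj) (by push_cast at hk0 ⊢; omega)
        have harr : k + 1 + (j : Int) = k + ((j : Nat) + 1 : Nat) := by push_cast; ring
        rw [harr] at this
        simpa [List.getD_cons_succ] using this
    · intro h
      constructor
      · by_cases hk0 : k = 0
        · simp [hk0]
        · have := h 0 (by simp) (by simpa using hk0)
          simp only [List.getD_cons_zero, Nat.cast_zero, add_zero] at this
          apply Bool.or_eq_true _ _ |>.mpr
          right
          rw [beq_iff_eq]
          by_cases hd : PySem.List.pyGetD (PySem.List.pyGetD T v []) last 0 ≠ 0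
          · simp [hd, this.mp hd]
          · simp only [decide_eq_false hd]
            have : ¬ (k ∈ D) := fun hm => hd (this.mpr hm)
            simp [this]
      · intro j hj hk0
        have := h (j + 1) (by simpa using hj) (by push_cast at hk0 ⊢; omega)
        have harr : k + ((j : Nat) + 1 : Nat) = k + 1 + (j : Int) := by push_cast; ring
        rw [harr] at this
        simpa [List.getD_cons_succ] using this

lemma mem_aDescSet_succ (T : List (List Int)) (perm : List Int) (n : Nat)
    (j : Nat) (hj : j + 1 < n) :
    ((j : Int) + 1) ∈ aDescSet T perm n
      ↔ PySem.List.pyGetD (PySem.List.pyGetD T (perm.getD (j + 1) 0) [])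
          (perm.getD j 0) 0 ≠ 0 := by
  rw [mem_aDescSet]
  constructor
  · rintro ⟨j₂, h₂, hd₂, he⟩
    have : j₂ = j := by omega
    rwa [this] at hd₂
  · intro hd; exact ⟨j, hj, hd, rfl⟩

lemma bridge (T : List (List Int)) (D : List Int) (n : Nat) (perm : List Int)
    (hlen : perm.length = n) (hD : ∀ d ∈ D, 1 ≤ d ∧ d ≤ (n : Int) - 1) :
    PySem.Set.equal (aDescSet T perm n) D = matchFrom T D perm 0 0 := by
  rw [Bool.eq_iff_iff, PySem.Set.equal_iff, matchFrom_iff]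
  constructor
  · intro hEq j' hj' hk0
    rw [hlen] at hj'
    cases j' with
    | zero => simp at hk0
    | succ j =>
      have hcast : (0:Int) + (((j + 1 : Nat)) : Int) = (j : Int) + 1 := by push_cast; ring
      rw [hcast]
      simp only [List.getD_cons_succ]
      rw [← hEq ((j : Int) + 1)]
      exact (mem_aDescSet_succ T perm n j hj').symm
  · intro hPt x
    by_cases hx : 1 ≤ x ∧ x ≤ (n : Int) - 1
    · obtain ⟨h1, h2⟩ := hx
      have hj : (x.toNat - 1) + 1 < n := by omega
      have hxe : x = ((x.toNat - 1 : Nat) : Int) + 1 := by omega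
      rw [hxe, mem_aDescSet_succ T perm n _ hj]
      have := hPt (x.toNat - 1 + 1) (by omega) (by push_cast; omega)
      have hcast : (0:Int) + (((x.toNat - 1 + 1 : Nat)) : Int) = ((x.toNat - 1 : Nat) : Int) + 1 := by push_cast; ring
      rw [hcast] at this
      simpa [List.getD_cons_succ] using this
    · constructor
      · intro hmem
        obtain ⟨j, hj, _, he⟩ := (mem_aDescSet T perm n x).mp hmem
        exact absurd ⟨by omega, by omega⟩ hx
      · intro hmem
        exact absurd (hD x hmem) hx

lemma equal_false_of_bad (T : List (List Int)) (D : List Int) (n : Nat) (perm : List Int)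
    (d : Int) (hd : d ∈ D) (hbad : d < 1 ∨ (n : Int) - 1 < d) :
    PySem.Set.equal (aDescSet T perm n) D = false := by
  rw [Bool.eq_false_iff]
  intro h
  rw [PySem.Set.equal_iff] at h
  obtain ⟨j, hj, _, he⟩ := (mem_aDescSet T perm n d).mp ((h d).mpr hd)
  rcases hbad with h1 | h2 <;> omega

lemma countA (T : List (List Int)) (D : List Int) :
    count_perms_with_descent_set T D
      = ((PySem.List.permutations (PySem.List.pyRange 0 (T.length : Int)) T.length).countP
          (fun perm => PySem.Set.equal (aDescSet T perm T.length) D) : Int) := by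
  show (PySem.List.permutations (PySem.List.pyRange 0 (T.length : Int)) T.length).foldl
    (fun count perm =>
      if PySem.Set.equal (aDescSet T perm T.length) D then count + 1 else count) 0 = _
  rw [PySem.List.foldl_count_if]
  simp

lemma length_of_mem_perms (n : Nat) (perm : List Int)
    (h : perm ∈ PySem.List.permutations (PySem.List.pyRange 0 (n : Int)) n) :
    perm.length = n := by
  have hlen : (PySem.List.pyRange 0 (n : Int)).length = n := by
    rw [PySem.List.pyRange_zero_natCast]; simp
  have h2 : perm ∈ PySem.List.permutations (PySem.List.pyRange 0 (n : Int))
      (PySem.List.pyRange 0 (n : Int)).length := by rw [hlen]; exact h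
  have := PySem.List.perm_of_mem_permutations h2
  rw [this.length_eq, hlen]

-- ===== VERDICT (by name: the statement is the Claim_ definition above) =====
theorem count_perms_with_descent_set_spec : Claim_equal_count_perms_with_descent_set := by
  intro T D _ _
  show count_perms_with_descent_set T D = count_perms_with_descent_set_alt T D
  rw [countA]
  show _ = (if D.any (fun p => decide (p < 1) || decide ((T.length : Int) - 1 < p)) then 0
    else goAlt T D T.length (PySem.List.pyRange 0 (T.length : Int)) 0 0)
  by_cases hbad : D.any (fun p => decide (p < 1) || decide ((T.length : Int) - 1 < p)) = true
  · rw [if_pos hbad]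
    obtain ⟨d, hd, hp⟩ := List.any_eq_true.mp hbad
    have hbad' : d < 1 ∨ (T.length : Int) - 1 < d := by
      rcases Bool.or_eq_true _ _ |>.mp hp with h | h
      · exact Or.inl (of_decide_eq_true h)
      · exact Or.inr (of_decide_eq_true h)
    rw [show ((List.countP (fun perm => PySem.Set.equal (aDescSet T perm T.length) D)
        (PySem.List.permutations (PySem.List.pyRange 0 (T.length : Int)) T.length)) = 0) from
      List.countP_eq_zero.mpr (fun perm _ => by
        simp [equal_false_of_bad T D T.length perm d hd hbad'])]
    simp
  · rw [if_neg hbad, goAlt_eq_countP]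
    congr 1
    apply List.countP_congr
    intro perm hperm
    have hlen := length_of_mem_perms T.length perm hperm
    have hD : ∀ d ∈ D, 1 ≤ d ∧ d ≤ (T.length : Int) - 1 := by
      intro d hd
      by_contra hc
      apply hbad
      apply List.any_eq_true.mpr
      refine ⟨d, hd, ?_⟩
      rcases lt_or_ge d 1 with h | h
      · simp [h]
      · have : (T.length : Int) - 1 < d := by by_contra hno; exact hc ⟨h, by omega⟩
        simp [this]
    rw [bridge T D T.length perm hlen hD]
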